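-- pv_equiv track=rewrite | github.com/takitani/miau | scripts/monitor.py | extract_last_error
-- ===== SOURCE A (Python) =====
-- def extract_last_error(log_content: str) -> str:
--     """Extrai o último bloco de erro do log (Go panic/error)"""
--     lines = log_content.split("\n")
--     error_lines = []
--     in_error = False
--
--     for line in lines:
--         line_lower = line.lower()
--         line_stripped = line.strip()
--
--         # Go stack trace markers
--         if line_stripped.startswith("goroutine ") or line_stripped.startswith("runtime."):
--             if in_error:
--                 error_lines.append(line)
--             continue
--
--         # Detecta início de erro
--         if "error" in line_lower or "panic" in line_lower or "fail" in line_lower: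
--             in_error = True
--             error_lines = [line]  # Reinicia só para NOVO erro
--         elif in_error:
--             # Continua capturando linhas do stack trace (Go style)
--             if (line_stripped.startswith("/") or
--                 line_stripped.startswith("main.") or
--                 line_stripped.startswith("runtime.") or
--                 line_stripped == "" or
--                 "\t" in line):
--                 error_lines.append(line)
--             else:
--                 # Fim do stack trace
--                 in_error = False
--
--     return "\n".join(error_lines) if error_lines else ""
-- ===== SOURCE B (Python) =====
-- def _is_marker(line):
--     ls = line.strip()
--     return ls.startswith("goroutine ") or ls.startswith("runtime.")
--
--
-- def _is_start(line):
--     if _is_marker(line):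
--         return False
--     ll = line.lower()
--     return "error" in ll or "panic" in ll or "fail" in ll
--
--
-- def _is_cont(line):
--     ls = line.strip()
--     return (ls.startswith("/") or ls.startswith("main.") or
--             ls.startswith("runtime.") or ls == "" or "\t" in line)
--
--
-- def extract_last_error(log_content: str) -> str:
--     lines = log_content.split("\n")
--     # pass 1: reverse scan for the last block-start line, collecting the lines after it
--     after = []
--     start = None
--     for line in reversed(lines):
--         if _is_start(line):
--             start = line
--             break
--         after.append(line)
--     if start is None:
--         return ""
--     after.reverse()
--     # pass 2: extend the block forward while lines are markers or continuations
--     block = [start]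
--     for line in after:
--         if _is_marker(line) or _is_cont(line):
--             block.append(line)
--         else:
--             break
--     return "\n".join(block)
-- ===== Notes on version B (the rewrite author's own statement) =====
-- stated objective: alternative
-- what changed: Replaces A's single forward state machine (in_error flag with block resets) by two passes: a reverse scan that finds the last block-start line, then a forward take-while that extends the block with marker/continuation lines.
import Mathlib
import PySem

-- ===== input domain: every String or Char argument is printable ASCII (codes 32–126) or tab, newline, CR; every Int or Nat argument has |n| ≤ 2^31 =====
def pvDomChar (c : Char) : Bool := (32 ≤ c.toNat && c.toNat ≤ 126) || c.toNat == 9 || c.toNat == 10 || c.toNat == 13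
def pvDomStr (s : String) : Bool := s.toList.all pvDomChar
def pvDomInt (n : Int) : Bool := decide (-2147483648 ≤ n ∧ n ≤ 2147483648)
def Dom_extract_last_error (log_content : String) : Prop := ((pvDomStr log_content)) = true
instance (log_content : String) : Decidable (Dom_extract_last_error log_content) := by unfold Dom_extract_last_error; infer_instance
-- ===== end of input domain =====

-- B replaces A's forward state machine by a reverse scan for the last block-start line
-- plus a forward take-while for the continuation lines; same return value, similar cost.

-- ===== PORT A =====
-- one loop iteration of A's state machine; state = (error_lines, in_error)
def pvStepA (st : List String × Bool) (line : String) : List String × Bool :=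
  let error_lines := st.1
  let in_error := st.2
  let line_lower := PySem.Str.lower line
  let line_stripped := PySem.Str.strip line
  if PySem.Str.startswith line_stripped "goroutine " || PySem.Str.startswith line_stripped "runtime." then
    (if in_error then error_lines ++ [line] else error_lines, in_error)
  else if PySem.Str.isIn "error" line_lower || PySem.Str.isIn "panic" line_lower || PySem.Str.isIn "fail" line_lower then
    ([line], true)
  else if in_error then
    (if PySem.Str.startswith line_stripped "/" || PySem.Str.startswith line_stripped "main." ||
        PySem.Str.startswith line_stripped "runtime." || line_stripped == "" ||
        PySem.Str.isIn "\t" line then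
      (error_lines ++ [line], true)
     else (error_lines, false))
  else (error_lines, false)

def extract_last_error (log_content : String) : String :=
  -- split? is some for the nonempty literal separator "\n" (Python's split never raises here)
  let lines := (PySem.Str.split? log_content "\n").getD []
  let res := lines.foldl pvStepA ([], false)
  if res.1.isEmpty then "" else PySem.Str.join "\n" res.1

-- ===== PORT B =====
def pvIsMarker (line : String) : Bool :=
  let ls := PySem.Str.strip line
  PySem.Str.startswith ls "goroutine " || PySem.Str.startswith ls "runtime."

def pvIsStart (line : String) : Bool :=
  if pvIsMarker line then false
  else
    let ll := PySem.Str.lower line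
    PySem.Str.isIn "error" ll || PySem.Str.isIn "panic" ll || PySem.Str.isIn "fail" ll

def pvIsCont (line : String) : Bool :=
  let ls := PySem.Str.strip line
  PySem.Str.startswith ls "/" || PySem.Str.startswith ls "main." ||
    PySem.Str.startswith ls "runtime." || ls == "" || PySem.Str.isIn "\t" line

-- reverse scan: first start line of the reversed list, with the lines after it (in order)
def pvFindLast : List String → List String → Option (String × List String)
  | [], _ => none
  | x :: xs, acc => if pvIsStart x then some (x, acc) else pvFindLast xs (x :: acc)

-- forward pass: extend the block while lines are markers or continuations
def pvTakeCont : List String → List String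
  | [] => []
  | x :: xs => if pvIsMarker x || pvIsCont x then x :: pvTakeCont xs else []

def extract_last_error_alt (log_content : String) : String :=
  let lines := (PySem.Str.split? log_content "\n").getD []
  match pvFindLast lines.reverse [] with
  | none => ""
  | some (s, after) => PySem.Str.join "\n" (s :: pvTakeCont after)

-- ===== PRECONDITION & SPEC =====
def Spec_extract_last_error (log_content : String) (out : String) : Prop := out = extract_last_error_alt log_content
instance (log_content : String) (out : String) : Decidable (Spec_extract_last_error log_content out) := by unfold Spec_extract_last_error; infer_instance

-- ===== CLAIM (what is proved, stated in full; the proofs are below) =====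
def Claim_equal_extract_last_error : Prop := ∀ (log_content : String), Dom_extract_last_error log_content → Spec_extract_last_error log_content (extract_last_error log_content)

-- ===== LEMMAS AND PROOFS =====

theorem pvTakeCont_cons (x : String) (xs : List String) :
    pvTakeCont (x :: xs) = if pvIsMarker x || pvIsCont x then x :: pvTakeCont xs else [] := rfl

def pvNoStart (l : List String) : Prop := ∀ x ∈ l, pvIsStart x = false

theorem pvStepA_start (st : List String × Bool) (s : String) (h : pvIsStart s = true) :
    pvStepA st s = ([s], true) := by
  unfold pvIsStart at h
  unfold pvStepA pvIsMarker at *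
  split_ifs at h ⊢ <;> simp_all

theorem pvFoldA_false (l : List String) (err : List String) (h : pvNoStart l) :
    l.foldl pvStepA (err, false) = (err, false) := by
  induction l with
  | nil => rfl
  | cons x xs ih =>
    have hx := h x (by simp)
    have hxs : pvNoStart xs := fun y hy => h y (by simp [hy])
    have hstep : pvStepA (err, false) x = (err, false) := by
      unfold pvIsStart at hx
      unfold pvStepA pvIsMarker at *
      split_ifs at hx ⊢ <;> simp_all
    simp only [List.foldl_cons, hstep, ih hxs]

theorem pvFoldA_true (l : List String) (err : List String) (h : pvNoStart l) :
    (l.foldl pvStepA (err, true)).1 = err ++ pvTakeCont l := by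
  induction l generalizing err with
  | nil => simp [pvTakeCont]
  | cons x xs ih =>
    have hx := h x (by simp)
    have hxs : pvNoStart xs := fun y hy => h y (by simp [hy])
    by_cases hm : pvIsMarker x = true
    · have hstep : pvStepA (err, true) x = (err ++ [x], true) := by
        unfold pvStepA; unfold pvIsMarker at hm; simp_all
      have ht : pvTakeCont (x :: xs) = x :: pvTakeCont xs := by
        rw [pvTakeCont_cons]; simp [hm]
      simp only [List.foldl_cons, hstep, ht, ih _ hxs, List.append_assoc, List.singleton_append]
    · have hkw : (PySem.Str.isIn "error" (PySem.Str.lower x) ||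
          PySem.Str.isIn "panic" (PySem.Str.lower x) ||
          PySem.Str.isIn "fail" (PySem.Str.lower x)) = false := by
        unfold pvIsStart at hx; simp_all
      by_cases hc : pvIsCont x = true
      · have hstep : pvStepA (err, true) x = (err ++ [x], true) := by
          unfold pvStepA; unfold pvIsMarker at hm; unfold pvIsCont at hc; simp_all
        have ht : pvTakeCont (x :: xs) = x :: pvTakeCont xs := by
          rw [pvTakeCont_cons]; simp [hc]
        simp only [List.foldl_cons, hstep, ht, ih _ hxs, List.append_assoc, List.singleton_append]
      · have hstep : pvStepA (err, true) x = (err, false) := by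
          unfold pvStepA; unfold pvIsMarker at hm; unfold pvIsCont at hc; simp_all
        have ht : pvTakeCont (x :: xs) = [] := by
          rw [pvTakeCont_cons]; simp [hm, hc]
        simp only [List.foldl_cons, hstep, ht, pvFoldA_false xs err hxs, List.append_nil]

theorem pvFindLast_none (r : List String) (acc : List String)
    (h : pvFindLast r acc = none) : pvNoStart r := by
  induction r generalizing acc with
  | nil => intro x hx; simp at hx
  | cons x xs ih =>
    unfold pvFindLast at h
    by_cases hx : pvIsStart x = true
    · simp [hx] at h
    · intro y hy
      rcases List.mem_cons.mp hy with h1 | h1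
      · simpa [h1] using hx
      · exact ih (x :: acc) (by simpa [hx] using h) y h1

theorem pvFindLast_some (r : List String) (acc s : _) (rest : List String)
    (h : pvFindLast r acc = some (s, rest)) :
    ∃ r₁ r₂, r = r₁ ++ s :: r₂ ∧ pvNoStart r₁ ∧ pvIsStart s = true ∧ rest = r₁.reverse ++ acc := by
  induction r generalizing acc with
  | nil => simp [pvFindLast] at h
  | cons x xs ih =>
    unfold pvFindLast at h
    by_cases hx : pvIsStart x = true
    · exact ⟨[], xs, by simp_all, fun y hy => by simp at hy, by simp_all, by simp_all⟩
    · rcases ih (x :: acc) (by simpa [hx] using h) with ⟨r₁, r₂, he, hns, hs, hr⟩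
      refine ⟨x :: r₁, r₂, by simp [he], ?_, hs, by simp [hr]⟩
      intro y hy
      rcases List.mem_cons.mp hy with h1 | h1
      · simpa [h1] using hx
      · exact hns y h1

-- ===== VERDICT (by name: the statement is the Claim_ definition above) =====
theorem extract_last_error_spec : Claim_equal_extract_last_error := by
  intro log_content _
  unfold Spec_extract_last_error extract_last_error extract_last_error_alt
  set lines := (PySem.Str.split? log_content "\n").getD [] with hlines
  cases h : pvFindLast lines.reverse [] with
  | none =>
    have hns : pvNoStart lines := by
      intro x hx
      exact pvFindLast_none lines.reverse [] h x (by simpa using hx)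
    simp [pvFoldA_false lines [] hns, h]
  | some p =>
    obtain ⟨s, after⟩ := p
    rcases pvFindLast_some lines.reverse [] s after h with ⟨r₁, r₂, he, hns, hs, hr⟩
    have hlines2 : lines = r₂.reverse ++ s :: r₁.reverse := by
      have := congrArg List.reverse he
      simpa [List.reverse_append] using this
    have hns1 : pvNoStart r₁.reverse := fun y hy => hns y (by simpa using hy)
    have hfold : (lines.foldl pvStepA ([], false)).1 = s :: pvTakeCont r₁.reverse := by
      rw [hlines2, List.foldl_append, List.foldl_cons,
        pvStepA_start (r₂.reverse.foldl pvStepA ([], false)) s hs]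
      simpa using pvFoldA_true r₁.reverse [s] hns1
    have hafter : after = r₁.reverse := by simpa using hr
    simp only [h, hafter, hfold]
    simp
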